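-- pv_equiv track=rewrite | github.com/CacheJoe/AI_Lab_Evaluator | evaluator.py | section_exists
-- ===== SOURCE A (Python) =====
-- def section_exists(norm_text, aliases):
--     words = norm_text.split()
--
--     for alias in aliases:
--         alias_tokens = set(alias.split())
--         window = len(alias_tokens) + 4
--
--         for i in range(len(words) - window + 1):
--             chunk = set(words[i:i+window])
--             if alias_tokens.issubset(chunk):
--                 return True
--
--     return False
-- ===== SOURCE B (Python) =====
-- def section_exists(norm_text, aliases):
--     words = norm_text.split()
--     n = len(words)
--     for alias in aliases:
--         tokens = set(alias.split())
--         k = len(tokens) + 4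
--         if n < k:
--             continue
--         last = {}
--         found = False
--         for j, w in enumerate(words):
--             if w in tokens:
--                 last[w] = j
--             if j >= k - 1 and all(last.get(t, -1) >= j - k + 1 for t in tokens):
--                 found = True
--                 break
--         if found:
--             return True
--     return False
-- ===== Notes on version B (the rewrite author's own statement) =====
-- stated objective: faster
-- what changed: Instead of rebuilding a set of the window's words and testing subset for every window start, B makes one left-to-right pass per alias maintaining each alias token's last-occurrence index in a dict and checks, at each position, that every token occurred within the last window-many words.
import Mathlib
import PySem

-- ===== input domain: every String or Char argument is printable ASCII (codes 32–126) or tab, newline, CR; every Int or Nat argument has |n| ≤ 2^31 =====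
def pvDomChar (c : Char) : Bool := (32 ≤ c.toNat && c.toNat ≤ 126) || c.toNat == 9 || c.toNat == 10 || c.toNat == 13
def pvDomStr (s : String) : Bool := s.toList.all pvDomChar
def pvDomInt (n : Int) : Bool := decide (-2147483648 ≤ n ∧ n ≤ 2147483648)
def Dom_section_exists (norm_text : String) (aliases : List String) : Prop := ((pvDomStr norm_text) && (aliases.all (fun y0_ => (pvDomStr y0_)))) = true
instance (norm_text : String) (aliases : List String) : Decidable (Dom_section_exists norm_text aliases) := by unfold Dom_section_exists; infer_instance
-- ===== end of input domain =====

-- B replaces A's per-window set rebuild by one left-to-right pass per alias that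
-- maintains each alias token's last occurrence index and checks the window bound
-- incrementally (objective: faster, constant-factor — no per-window set building).

-- ===== PORT A =====
def section_exists (norm_text : String) (aliases : List String) : Bool :=
  let words := PySem.Str.split₀ norm_text
  aliases.any (fun al =>
    let alias_tokens : PySem.Set String := PySem.Set.ofList (PySem.Str.split₀ al)
    let window : Int := PySem.Set.len alias_tokens + 4
    (PySem.List.pyRange 0 ((words.length : Int) - window + 1) 1).any (fun i =>
      PySem.Set.issubset alias_tokens
        (PySem.Set.ofList (PySem.List.slice words (some i) (some (i + window))))))

-- ===== PORT B =====
-- B-side helpers: one loop step updates the last-occurrence dict; the window test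
-- reads it back (`last.get(t, -1) >= j - k + 1`).
def pvStep (tokens : PySem.Set String) (last : PySem.Dict String Int) (p : Int × String) :
    PySem.Dict String Int :=
  if PySem.Set.contains tokens p.2 then last.insert p.2 p.1 else last

def pvHit (tokens : PySem.Set String) (k : Int) (last : PySem.Dict String Int) (j : Int) : Bool :=
  decide (k - 1 ≤ j) && tokens.all (fun t => decide (j - k + 1 ≤ PySem.Dict.getD last t (-1)))

def pvLoop (tokens : PySem.Set String) (k : Int) (last : PySem.Dict String Int) :
    List (Int × String) → Bool
  | [] => false
  | p :: rest =>
    let last' := pvStep tokens last p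
    if pvHit tokens k last' p.1 then true else pvLoop tokens k last' rest

def section_exists_alt (norm_text : String) (aliases : List String) : Bool :=
  let words := PySem.Str.split₀ norm_text
  let n : Int := words.length
  aliases.any (fun al =>
    let tokens : PySem.Set String := PySem.Set.ofList (PySem.Str.split₀ al)
    let k : Int := PySem.Set.len tokens + 4
    if n < k then false
    else pvLoop tokens k PySem.Dict.empty (PySem.List.enumerate words))

-- ===== PRECONDITION & SPEC =====
def Spec_section_exists (norm_text : String) (aliases : List String) (out : Bool) : Prop := out = section_exists_alt norm_text aliases
instance (norm_text : String) (aliases : List String) (out : Bool) : Decidable (Spec_section_exists norm_text aliases out) := by unfold Spec_section_exists; infer_instance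

-- ===== CLAIM (what is proved, stated in full; the proofs are below) =====
def Claim_equal_section_exists : Prop := ∀ (norm_text : String) (aliases : List String), Dom_section_exists norm_text aliases → Spec_section_exists norm_text aliases (section_exists norm_text aliases)

-- ===== LEMMAS AND PROOFS =====

theorem pvIdxLt {α : Type} (l : List α) (j : Nat) (t : α) (h : l[j]? = some t) :
    j < l.length := by
  by_contra hge
  rw [List.getElem?_eq_none_iff.2 (by omega)] at h
  simp at h

-- last-occurrence dict after the first m loop steps of B
def pvL (T : PySem.Set String) (words : List String) (m : Nat) : PySem.Dict String Int :=
  ((PySem.List.enumerate words).take m).foldl (pvStep T) PySem.Dict.empty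

theorem pvL_succ (T : PySem.Set String) (words : List String) (m : Nat)
    (hm : m < words.length) :
    pvL T words (m + 1) = pvStep T (pvL T words m) ((m : Int), words[m]) := by
  unfold pvL
  rw [List.take_add_one]
  have h1 : (PySem.List.enumerate words)[m]? = some ((m : Int), words[m]) := by
    rw [PySem.List.getElem?_enumerate, List.getElem?_eq_getElem hm]
    simp
  rw [h1]
  simp [List.foldl_append]

theorem pvGetD_pvL (T : PySem.Set String) (words : List String) :
    ∀ (m : Nat) (t : String), t ∈ T → ∀ b : Int, 0 ≤ b →
      (b ≤ (pvL T words m).getD t (-1) ↔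
        ∃ j : Nat, j < m ∧ b ≤ (j : Int) ∧ words[j]? = some t) := by
  intro m
  induction m with
  | zero =>
    intro t _ b hb
    simp [pvL, PySem.Dict.getD_empty]
    omega
  | succ m ih =>
    intro t ht b hb
    by_cases hm : m < words.length
    · rw [pvL_succ T words m hm]
      unfold pvStep
      by_cases hc : PySem.Set.contains T words[m] = true
      · rw [if_pos hc]
        by_cases hteq : t = words[m]
        · subst hteq
          rw [PySem.Dict.getD_insert_self]
          constructor
          · intro hbm
            exact ⟨m, by omega, hbm, by rw [List.getElem?_eq_getElem hm]⟩
          · rintro ⟨j, hj1, hj2, hj3⟩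
            have := pvIdxLt words j _ hj3
            omega
        · rw [PySem.Dict.getD_insert_of_ne _ _ _ hteq]
          rw [ih t ht b hb]
          constructor
          · rintro ⟨j, hj1, hj2, hj3⟩; exact ⟨j, by omega, hj2, hj3⟩
          · rintro ⟨j, hj1, hj2, hj3⟩
            refine ⟨j, ?_, hj2, hj3⟩
            rcases Nat.lt_succ_iff_lt_or_eq.1 hj1 with h | h
            · exact h
            · subst h
              rw [List.getElem?_eq_getElem hm] at hj3
              exact absurd (Option.some.inj hj3).symm hteq
      · rw [if_neg hc]
        have hteq : t ≠ words[m] := fun h =>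
          hc (h ▸ (PySem.Set.contains_iff T t).2 ht)
        rw [ih t ht b hb]
        constructor
        · rintro ⟨j, hj1, hj2, hj3⟩; exact ⟨j, by omega, hj2, hj3⟩
        · rintro ⟨j, hj1, hj2, hj3⟩
          refine ⟨j, ?_, hj2, hj3⟩
          rcases Nat.lt_succ_iff_lt_or_eq.1 hj1 with h | h
          · exact h
          · subst h
            rw [List.getElem?_eq_getElem hm] at hj3
            exact absurd (Option.some.inj hj3).symm hteq
    · have hL : pvL T words (m + 1) = pvL T words m := by
        unfold pvL
        rw [List.take_add_one]
        have : (PySem.List.enumerate words)[m]? = none := by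
          rw [List.getElem?_eq_none_iff]
          rw [PySem.List.length_enumerate]; omega
        rw [this]; simp
      rw [hL, ih t ht b hb]
      constructor
      · rintro ⟨j, hj1, hj2, hj3⟩; exact ⟨j, by omega, hj2, hj3⟩
      · rintro ⟨j, hj1, hj2, hj3⟩
        have := pvIdxLt words j _ hj3
        exact ⟨j, by omega, hj2, hj3⟩

theorem pvLoop_iff (T : PySem.Set String) (words : List String) (k : Int) :
    ∀ (fuel m : Nat), words.length ≤ m + fuel →
      (pvLoop T k (pvL T words m) ((PySem.List.enumerate words).drop m) = true ↔
        ∃ j : Nat, m ≤ j ∧ j < words.length ∧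
          pvHit T k (pvL T words (j + 1)) (j : Int) = true) := by
  intro fuel
  induction fuel with
  | zero =>
    intro m hmf
    have hdrop : (PySem.List.enumerate words).drop m = [] := by
      apply List.drop_eq_nil_of_le
      rw [PySem.List.length_enumerate]; omega
    rw [hdrop]
    simp [pvLoop]
    intro j h1 h2
    omega
  | succ fuel ih =>
    intro m hmf
    by_cases hm : m < words.length
    · have hlen : m < (PySem.List.enumerate words).length := by
        rw [PySem.List.length_enumerate]; exact hm
      rw [List.drop_eq_getElem_cons hlen]
      rw [PySem.List.getElem_enumerate]
      have hz : (0 : Int) + (m : Int) = (m : Int) := by ring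
      rw [hz]
      show (if pvHit T k (pvStep T (pvL T words m) ((m : Int), words[m])) (m : Int) then true
            else pvLoop T k (pvStep T (pvL T words m) ((m : Int), words[m]))
              ((PySem.List.enumerate words).drop (m + 1))) = true ↔ _
      rw [← pvL_succ T words m hm]
      by_cases hhit : pvHit T k (pvL T words (m + 1)) (m : Int) = true
      · rw [if_pos hhit]
        exact ⟨fun _ => ⟨m, le_refl m, hm, hhit⟩, fun _ => rfl⟩
      · rw [if_neg hhit, ih (m + 1) (by omega)]
        constructor
        · rintro ⟨j, hj1, hj2, hj3⟩; exact ⟨j, by omega, hj2, hj3⟩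
        · rintro ⟨j, hj1, hj2, hj3⟩
          refine ⟨j, ?_, hj2, hj3⟩
          rcases Nat.eq_or_lt_of_le hj1 with h | h
          · subst h; exact absurd hj3 hhit
          · omega
    · have hdrop : (PySem.List.enumerate words).drop m = [] := by
        apply List.drop_eq_nil_of_le
        rw [PySem.List.length_enumerate]; omega
      rw [hdrop]
      simp [pvLoop]
      intro j h1 h2
      omega

-- A's per-window subset test, characterised by occurrence indices
theorem pvSubset_iff (T : PySem.Set String) (words : List String) (i k : Int)
    (hi : 0 ≤ i) (hk : 0 ≤ k) (hik : i + k ≤ (words.length : Int)) :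
    (PySem.Set.issubset T (PySem.Set.ofList (PySem.List.slice words (some i) (some (i + k)))) = true ↔
      ∀ t ∈ T, ∃ j : Nat, i ≤ (j : Int) ∧ (j : Int) < i + k ∧ words[j]? = some t) := by
  rw [PySem.Set.issubset_iff]
  have hslice : PySem.List.slice words (some i) (some (i + k)) =
      List.take ((i + k).toNat - i.toNat) (List.drop i.toNat words) := by
    exact PySem.List.slice_of_nonneg words hi (by omega) (by omega) hik
  constructor
  · intro h t ht
    have := h t ht
    rw [PySem.Set.mem_ofList, hslice] at this
    rcases List.mem_iff_getElem.1 this with ⟨jj, hjj, hjjeq⟩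
    have hjj' : jj < (i + k).toNat - i.toNat := by
      have := hjj
      simp [List.length_take, List.length_drop] at this
      omega
    have hjjd : i.toNat + jj < words.length := by
      have := hjj
      simp [List.length_take, List.length_drop] at this
      omega
    refine ⟨i.toNat + jj, by omega, by omega, ?_⟩
    rw [List.getElem?_eq_getElem hjjd]
    congr 1
    rw [← hjjeq]
    rw [List.getElem_take, List.getElem_drop]
  · intro h t ht
    rcases h t ht with ⟨j, hj1, hj2, hj3⟩
    rw [PySem.Set.mem_ofList, hslice]
    have hjlen : j < words.length := pvIdxLt words j _ hj3
    have hjj : j - i.toNat < (i + k).toNat - i.toNat := by omega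
    apply List.mem_iff_getElem?.2
    refine ⟨j - i.toNat, ?_⟩
    rw [List.getElem?_take_of_lt hjj, List.getElem?_drop]
    have hidx : i.toNat + (j - i.toNat) = j := by omega
    rw [hidx]
    exact hj3

-- per-alias equivalence of the two window searches
theorem pvAlias_eq (words : List String) (T : PySem.Set String) (k : Int) (hk : 1 ≤ k) :
    ((PySem.List.pyRange 0 ((words.length : Int) - k + 1) 1).any (fun i =>
        PySem.Set.issubset T (PySem.Set.ofList (PySem.List.slice words (some i) (some (i + k))))) =
      if (words.length : Int) < k then false
      else pvLoop T k PySem.Dict.empty (PySem.List.enumerate words)) := by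
  by_cases hnk : (words.length : Int) < k
  · rw [if_pos hnk]
    rw [PySem.List.pyRange_one_eq_nil (by omega)]
    rfl
  · rw [if_neg hnk]
    have hB : pvLoop T k PySem.Dict.empty (PySem.List.enumerate words) =
        pvLoop T k (pvL T words 0) ((PySem.List.enumerate words).drop 0) := rfl
    rw [hB]
    rw [Bool.eq_iff_iff, List.any_eq_true,
      pvLoop_iff T words k words.length 0 (by omega)]
    constructor
    · rintro ⟨i, hmem, hsub⟩
      rw [PySem.List.mem_pyRange_one] at hmem
      obtain ⟨hi0, hilt⟩ := hmem
      have hsub' := (pvSubset_iff T words i k hi0 (by omega) (by omega)).1 hsub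
      have hj0lt : (i + k - 1).toNat < words.length := by omega
      refine ⟨(i + k - 1).toNat, Nat.zero_le _, hj0lt, ?_⟩
      unfold pvHit
      rw [Bool.and_eq_true]
      have hcast : ((i + k - 1).toNat : Int) = i + k - 1 := by omega
      constructor
      · rw [decide_eq_true_iff, hcast]; omega
      · rw [List.all_eq_true]
        intro t ht
        rw [decide_eq_true_iff, hcast]
        have hb0 : (0 : Int) ≤ i + k - 1 - k + 1 := by omega
        rw [pvGetD_pvL T words ((i + k - 1).toNat + 1) t ht (i + k - 1 - k + 1) hb0]
        rcases hsub' t ht with ⟨j, hj1, hj2, hj3⟩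
        exact ⟨j, by omega, by omega, hj3⟩
    · rintro ⟨j0, _, hj0lt, hhit⟩
      unfold pvHit at hhit
      rw [Bool.and_eq_true, decide_eq_true_iff, List.all_eq_true] at hhit
      obtain ⟨hj0k, hall⟩ := hhit
      refine ⟨(j0 : Int) - k + 1, ?_, ?_⟩
      · rw [PySem.List.mem_pyRange_one]; omega
      · rw [pvSubset_iff T words ((j0 : Int) - k + 1) k (by omega) (by omega) (by omega)]
        intro t ht
        have := hall t ht
        rw [decide_eq_true_iff] at this
        rw [pvGetD_pvL T words (j0 + 1) t ht ((j0 : Int) - k + 1) (by omega)] at this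
        rcases this with ⟨j, hj1, hj2, hj3⟩
        exact ⟨j, by omega, by omega, hj3⟩

-- ===== VERDICT (by name: the statement is the Claim_ definition above) =====
theorem section_exists_spec : Claim_equal_section_exists := by
  intro norm_text aliases _
  unfold Spec_section_exists section_exists section_exists_alt
  dsimp only
  refine List.any_congr rfl ?_
  intro al
  exact pvAlias_eq (PySem.Str.split₀ norm_text)
    (PySem.Set.ofList (PySem.Str.split₀ al)) _
    (by rw [PySem.Set.len_eq]; omega)
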